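-- pv_equiv track=rewrite | github.com/Sasank123k/problem-of-the-day | 2022-01-11.PY | check
-- ===== SOURCE A (Python) =====
-- def check(x,y):
--
--     if len(x)>len(y):
--         for i in y:
--             if i in x:
--                 x=x.replace(i,'+',1)
--                 y=y.replace(i,'+')
--
--     elif len(x)<len(y):
--         for i in x:
--             if i in y:
--                 x=x.replace(i,'+')
--                 y=y.replace(i,'+',1)
--
--     else:
--         for i in y:
--             if i in x:
--                 x=x.replace(i,'+',1)
--                 y=y.replace(i,'+')
--     x="".join([i for i in x if i.isdigit()])
--     y="".join([i for i in y if i.isdigit()])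
--     if x=="" and y=="":
--         x="1"
--         y="1"
--     elif x=="" and y!="":
--         x="1"
--     elif x!="" and y=="":
--         y="1"
--     else:
--         pass
--
--     return [int(x),int(y)]
-- ===== SOURCE B (Python) =====
-- def check(x, y):
--     # Single pass with per-char counts: the side iterated over in A loses all
--     # occurrences of shared chars; the other side loses, per char c, its first
--     # min(count_c(long side), count_c(other)) occurrences.
--     if len(x) >= len(y):
--         longer, shorter, swapped = x, y, False
--     else:
--         longer, shorter, swapped = y, x, True
--     cnt_long = {}
--     for c in longer:
--         cnt_long[c] = cnt_long.get(c, 0) + 1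
--     cnt_short = {}
--     for c in shorter:
--         cnt_short[c] = cnt_short.get(c, 0) + 1
--     seen = {}
--     ld = []
--     for c in longer:
--         if c.isdigit():
--             s = seen.get(c, 0) + 1
--             seen[c] = s
--             if s > min(cnt_long.get(c, 0), cnt_short.get(c, 0)):
--                 ld.append(c)
--     sd = [c for c in shorter if c.isdigit() and c not in cnt_long]
--     a = int("".join(ld)) if ld else 1
--     b = int("".join(sd)) if sd else 1
--     return [b, a] if swapped else [a, b]
-- ===== Notes on version B (the rewrite author's own statement) =====
-- stated objective: faster
-- what changed: Replaces A's repeated str.replace/in scans (quadratic rebuilding of both strings) by a single pass with per-char count dictionaries: the iterated side keeps only digits absent from the other side, the other side skips, per digit d, its first min(count_d(self), count_d(other)) occurrences.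
import Mathlib
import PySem

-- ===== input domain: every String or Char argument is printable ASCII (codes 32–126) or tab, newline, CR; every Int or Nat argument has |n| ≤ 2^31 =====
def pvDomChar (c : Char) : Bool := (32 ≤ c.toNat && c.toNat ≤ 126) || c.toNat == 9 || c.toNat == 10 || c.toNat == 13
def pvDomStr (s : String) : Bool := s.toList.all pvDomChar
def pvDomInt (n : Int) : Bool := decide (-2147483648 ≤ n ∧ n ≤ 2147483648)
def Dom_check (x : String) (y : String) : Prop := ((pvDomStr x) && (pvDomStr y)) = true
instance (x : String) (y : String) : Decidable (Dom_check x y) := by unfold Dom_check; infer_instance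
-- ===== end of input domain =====

-- B replaces A's quadratic repeated str.replace/in scans by one counting pass per side (objective: faster).


-- ===== PORT A =====
-- s.replace(i,'+',1) for a single char i (exact: Python replaces the first occurrence of the substring i)
def markFirst : List Char → Char → List Char
  | [], _ => []
  | c :: t, i => if c = i then '+' :: t else c :: markFirst t i

-- s.replace(i,'+') for a single char i (exact: every occurrence replaced)
def markAll (s : List Char) (i : Char) : List Char := s.map (fun c => if c = i then '+' else c)

-- loop body of A's branches 1 and 3: `if i in x: x=x.replace(i,'+',1); y=y.replace(i,'+')`
-- (`i in x` for a 1-char i is exactly char membership)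
def stepXY (st : List Char × List Char) (i : Char) : List Char × List Char :=
  if st.1.contains i then (markFirst st.1 i, markAll st.2 i) else st

-- loop body of A's branch 2: `if i in y: x=x.replace(i,'+'); y=y.replace(i,'+',1)`
def stepYX (st : List Char × List Char) (i : Char) : List Char × List Char :=
  if st.2.contains i then (markAll st.1 i, markFirst st.2 i) else st

-- int(s) for the nonempty all-digit strings built below (PySem.Int.ofChars? is some there)
def digitsToInt (l : List Char) : Int := (PySem.Int.ofChars? l).getD 0

def check (x : String) (y : String) : List Int :=
  let xs := x.toList
  let ys := y.toList
  -- Python's `for i in y` iterates the ORIGINAL string even though y is rebound inside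
  let st :=
    if xs.length > ys.length then ys.foldl stepXY (xs, ys)
    else if xs.length < ys.length then xs.foldl stepYX (xs, ys)
    else ys.foldl stepXY (xs, ys)
  let xd := st.1.filter (fun c => PySem.Chars.isdigit c)
  let yd := st.2.filter (fun c => PySem.Chars.isdigit c)
  let p : List Char × List Char :=
    if xd = [] ∧ yd = [] then (['1'], ['1'])
    else if xd = [] ∧ yd ≠ [] then (['1'], yd)
    else if xd ≠ [] ∧ yd = [] then (xd, ['1'])
    else (xd, yd)
  [digitsToInt p.1, digitsToInt p.2]

-- ===== PORT B =====
-- `cnt[c] = cnt.get(c,0) + 1` loop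
def counterOf (s : List Char) : PySem.Dict Char Int :=
  s.foldl (fun d c => d.insert c (d.getD c 0 + 1)) PySem.Dict.empty

-- body of Source B's `for c in longer` loop (state: seen dict, accumulated digit list)
def bStep (cntL cntS : PySem.Dict Char Int) (st : PySem.Dict Char Int × List Char) (c : Char) :
    PySem.Dict Char Int × List Char :=
  if PySem.Chars.isdigit c then
    let s := st.1.getD c 0 + 1
    let seen' := st.1.insert c s
    if s > min (cntL.getD c 0) (cntS.getD c 0) then (seen', st.2 ++ [c]) else (seen', st.2)
  else st

def check_alt (x : String) (y : String) : List Int :=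
  let xl := x.toList
  let yl := y.toList
  let t : List Char × List Char × Bool :=
    if xl.length ≥ yl.length then (xl, yl, false) else (yl, xl, true)
  let longer := t.1
  let shorter := t.2.1
  let swapped := t.2.2
  let cntL := counterOf longer
  let cntS := counterOf shorter
  let ld := (longer.foldl (bStep cntL cntS) (PySem.Dict.empty, [])).2
  let sd := shorter.filter (fun c => PySem.Chars.isdigit c && !(cntL.contains c))
  let a := if ld ≠ [] then digitsToInt ld else 1
  let b := if sd ≠ [] then digitsToInt sd else 1
  if swapped then [b, a] else [a, b]

-- ===== PRECONDITION & SPEC =====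
def Spec_check (x : String) (y : String) (out : List Int) : Prop := out = check_alt x y
instance (x : String) (y : String) (out : List Int) : Decidable (Spec_check x y out) := by unfold Spec_check; infer_instance

-- ===== CLAIM (what is proved, stated in full; the proofs are below) =====
def Claim_equal_check : Prop := ∀ (x : String) (y : String), Dom_check x y → Spec_check x y (check x y)

-- ===== LEMMAS AND PROOFS =====

-- spec-side machine: walk a char list, silently dropping the first (g c) occurrences of each char c
def dropBy : List Char → (Char → Nat) → List Char
  | [], _ => []
  | c :: t, g => if 0 < g c then dropBy t (fun c' => if c' = c then g c - 1 else g c') else c :: dropBy t g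

theorem isdigit_ne_plus {c : Char} (h : PySem.Chars.isdigit c = true) : c ≠ '+' := by
  rintro rfl; simp [PySem.Chars.isdigit] at h

theorem markFirst_plus (s : List Char) : markFirst s '+' = s := by
  induction s with
  | nil => rfl
  | cons a t ih =>
    by_cases h : a = '+'
    · subst h; simp [markFirst]
    · simp [markFirst, h, ih]

theorem markAll_plus (s : List Char) : markAll s '+' = s := by
  have h : (fun c : Char => if c = '+' then '+' else c) = id := by
    funext c; by_cases h : c = '+' <;> simp [h]
  simp [markAll, h]

theorem markFirst_split {s : List Char} {i : Char} (h : i ∈ s) :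
    ∃ p q, s = p ++ i :: q ∧ i ∉ p ∧ markFirst s i = p ++ '+' :: q := by
  induction s with
  | nil => simp at h
  | cons a t ih =>
    by_cases ha : a = i
    · subst ha; exact ⟨[], t, by simp [markFirst]⟩
    · have ht : i ∈ t := by
        rcases List.mem_cons.1 h with h' | h'
        · exact absurd h'.symm ha
        · exact h'
      obtain ⟨p, q, h1, h2, h3⟩ := ih ht
      exact ⟨a :: p, q, by simp [h1], by simp [h2, Ne.symm ha], by simp [markFirst, ha, h3]⟩

theorem mem_markFirst {s : List Char} {i c : Char} (hp : c ≠ '+') (hi : c ≠ i) :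
    c ∈ markFirst s i ↔ c ∈ s := by
  induction s with
  | nil => rfl
  | cons a t ih =>
    by_cases ha : a = i
    · subst ha; simp [markFirst, hp, hi]
    · simp [markFirst, ha, ih]

theorem count_markFirst_ne {s : List Char} {i d : Char} (hp : d ≠ '+') (hi : d ≠ i) :
    (markFirst s i).count d = s.count d := by
  induction s with
  | nil => rfl
  | cons a t ih =>
    by_cases ha : a = i
    · subst ha; simp [markFirst, List.count_cons, Ne.symm hp, Ne.symm hi]
    · simp [markFirst, ha, List.count_cons, ih]

theorem count_markFirst_self {s : List Char} {i : Char} (hp : i ≠ '+') (h : i ∈ s) :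
    (markFirst s i).count i + 1 = s.count i := by
  obtain ⟨p, q, h1, h2, h3⟩ := markFirst_split h
  subst h1
  simp [h3, List.count_append, List.count_cons, Ne.symm hp]
  omega

theorem filter_markAll (s : List Char) (i : Char) (r : Char → Bool) :
    (markAll s i).filter (fun c => PySem.Chars.isdigit c && r c)
      = s.filter (fun c => PySem.Chars.isdigit c && !(c == i) && r c) := by
  unfold markAll
  rw [List.filter_map]
  have h1 : s.filter ((fun c => PySem.Chars.isdigit c && r c) ∘ (fun c => if c = i then '+' else c))
      = s.filter (fun c => PySem.Chars.isdigit c && !(c == i) && r c) := by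
    refine List.filter_congr fun c _ => ?_
    by_cases e : c = i
    · subst e
      have hpd : PySem.Chars.isdigit '+' = false := by decide
      simp [Function.comp, hpd]
    · simp [Function.comp, e, beq_eq_false_iff_ne.2 e]
  rw [h1]
  rw [show (fun c : Char => if c = i then '+' else c) = fun c => if c = i then '+' else id c from rfl]
  refine Eq.trans (List.map_congr_left fun c hc => ?_) (List.map_id _)
  have := (List.mem_filter.1 hc).2
  have e : c ≠ i := by
    intro h; subst h; simp at this
  simp [e]

theorem dropBy_congr {l : List Char} {g₁ g₂ : Char → Nat} (h : ∀ c ∈ l, g₁ c = g₂ c) :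
    dropBy l g₁ = dropBy l g₂ := by
  induction l generalizing g₁ g₂ with
  | nil => rfl
  | cons c t ih =>
    have hc : g₁ c = g₂ c := h c (by simp)
    by_cases hpos : 0 < g₁ c
    · rw [dropBy, dropBy, if_pos hpos, if_pos (hc ▸ hpos)]
      refine ih fun c' hc' => ?_
      by_cases e : c' = c <;> simp [e, hc, h c' (by simp [hc'])]
    · rw [dropBy, dropBy, if_neg hpos, if_neg (hc ▸ hpos)]
      exact congrArg (c :: ·) (ih fun c' hc' => h c' (by simp [hc']))

theorem dropBy_zero {l : List Char} {g : Char → Nat} (h : ∀ c ∈ l, g c = 0) :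
    dropBy l g = l := by
  induction l generalizing g with
  | nil => rfl
  | cons c t ih =>
    rw [dropBy, if_neg (by simp [h c (by simp)])]
    exact congrArg (c :: ·) (ih fun c' hc' => h c' (by simp [hc']))

theorem dropBy_skip {l₁ l₂ : List Char} {i : Char} {g : Char → Nat}
    (h1 : i ∉ l₁) (h2 : 0 < g i) :
    dropBy (l₁ ++ i :: l₂) g = dropBy (l₁ ++ l₂) (fun c => if c = i then g i - 1 else g c) := by
  induction l₁ generalizing g with
  | nil => simp [dropBy, if_pos h2]
  | cons a t ih =>
    simp only [List.mem_cons, not_or] at h1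
    have hai : a ≠ i := fun e => h1.1 e.symm
    by_cases hpos : 0 < g a
    · rw [List.cons_append, dropBy, if_pos hpos, List.cons_append, dropBy,
        if_pos (by simpa [hai] using hpos)]
      rw [ih h1.2 (by simpa [Ne.symm hai] using h2)]
      refine dropBy_congr fun c _ => ?_
      by_cases e1 : c = i <;> by_cases e2 : c = a <;> simp [e1, e2, hai, Ne.symm hai] <;> omega
    · rw [List.cons_append, dropBy, if_neg hpos, List.cons_append, dropBy,
        if_neg (by simpa [hai] using hpos)]
      exact congrArg (a :: ·) (ih h1.2 h2)

-- characterisation of the first component of A's branch-1/3 loop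
theorem lemX (it : List Char) : ∀ (x y : List Char),
    ((it.foldl stepXY (x, y)).1).filter (fun c => PySem.Chars.isdigit c)
      = dropBy (x.filter (fun c => PySem.Chars.isdigit c))
          (fun d => min (x.count d) (it.count d)) := by
  induction it with
  | nil =>
    intro x y
    exact (dropBy_zero (fun c _ => by simp)).symm
  | cons i t ih =>
    intro x y
    rw [List.foldl_cons]
    by_cases hp : i = '+'
    · subst hp
      have hstep : stepXY (x, y) '+' = (x, y) := by
        unfold stepXY; split <;> simp [markFirst_plus, markAll_plus]
      rw [hstep, ih]
      refine dropBy_congr fun c hc => ?_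
      have hd : PySem.Chars.isdigit c = true := (List.mem_filter.1 hc).2
      simp [List.count_cons, Ne.symm (isdigit_ne_plus hd)]
    · by_cases hm : x.contains i
      · have hmem : i ∈ x := by simpa using hm
        have hstep : stepXY (x, y) i = (markFirst x i, markAll y i) := by
          unfold stepXY; rw [if_pos hm]
        rw [hstep, ih]
        by_cases hd : PySem.Chars.isdigit i
        · obtain ⟨p, q, h1, h2, h3⟩ := markFirst_split hmem
          have hxf : x.filter (fun c => PySem.Chars.isdigit c)
              = p.filter (fun c => PySem.Chars.isdigit c) ++ i :: q.filter (fun c => PySem.Chars.isdigit c) := by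
            rw [h1]; simp [List.filter_append, List.filter_cons, hd]
          have hmf : (markFirst x i).filter (fun c => PySem.Chars.isdigit c)
              = p.filter (fun c => PySem.Chars.isdigit c) ++ q.filter (fun c => PySem.Chars.isdigit c) := by
            rw [h3]; simp [List.filter_append, List.filter_cons, PySem.Chars.isdigit]
          have hcx : 1 ≤ x.count i := List.one_le_count_iff.2 hmem
          rw [hmf, hxf, dropBy_skip (fun hf => h2 (List.mem_of_mem_filter hf))
            (by simp [List.count_cons]; omega)]
          refine dropBy_congr fun c hc => ?_
          have hcd : PySem.Chars.isdigit c = true := by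
            rcases List.mem_append.1 hc with h | h <;> exact (List.mem_filter.1 h).2
          by_cases e : c = i
          · subst e
            have := count_markFirst_self hp hmem
            simp [List.count_cons]
            omega
          · simp [e, Ne.symm e, count_markFirst_ne (isdigit_ne_plus hcd) e, List.count_cons]
        · have hmf : (markFirst x i).filter (fun c => PySem.Chars.isdigit c)
              = x.filter (fun c => PySem.Chars.isdigit c) := by
            obtain ⟨p, q, h1, h2, h3⟩ := markFirst_split hmem
            have hd' : PySem.Chars.isdigit i = false := by simpa using hd
            have hpd : PySem.Chars.isdigit '+' = false := by decide
            rw [h3, h1]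
            simp [List.filter_append, List.filter_cons, hd', hpd]
          rw [hmf]
          refine dropBy_congr fun c hc => ?_
          have hcd : PySem.Chars.isdigit c = true := (List.mem_filter.1 hc).2
          have e : c ≠ i := fun h => hd (h ▸ hcd)
          simp [count_markFirst_ne (isdigit_ne_plus hcd) e, List.count_cons, e, Ne.symm e]
      · have hstep : stepXY (x, y) i = (x, y) := by unfold stepXY; rw [if_neg hm]
        rw [hstep, ih]
        refine dropBy_congr fun c hc => ?_
        have hnm : i ∉ x := by simpa using hm
        by_cases e : c = i
        · subst e; simp [List.count_eq_zero.2 hnm]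
        · simp [List.count_cons, e, Ne.symm e]

-- characterisation of the second component of A's branch-1/3 loop
theorem lemY (it : List Char) : ∀ (x y : List Char),
    ((it.foldl stepXY (x, y)).2).filter (fun c => PySem.Chars.isdigit c)
      = y.filter (fun c => PySem.Chars.isdigit c && !(it.contains c && x.contains c)) := by
  induction it with
  | nil =>
    intro x y
    simp
  | cons i t ih =>
    intro x y
    rw [List.foldl_cons]
    by_cases hm : x.contains i
    · have hstep : stepXY (x, y) i = (markFirst x i, markAll y i) := by
        unfold stepXY; rw [if_pos hm]
      rw [hstep]
      have := ih (markFirst x i) (markAll y i)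
      rw [this, filter_markAll]
      refine List.filter_congr fun c _ => ?_
      by_cases hd : PySem.Chars.isdigit c
      · by_cases e : c = i
        · subst e; simp [hd, hm, show c ∈ x by simpa using hm]
        · have hmm : c ∈ markFirst x i ↔ c ∈ x := mem_markFirst (isdigit_ne_plus hd) e
          simp [hd, beq_eq_false_iff_ne.2 e, hmm, e]
      · simp [hd]
    · have hstep : stepXY (x, y) i = (x, y) := by unfold stepXY; rw [if_neg hm]
      rw [hstep, ih]
      refine List.filter_congr fun c _ => ?_
      by_cases e : c = i
      · subst e; simp [show c ∉ x from by simpa using hm]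
      · simp [e]

-- A's branch-2 loop is the branch-1 loop with the components swapped
theorem lemSwap (it : List Char) : ∀ (a b : List Char),
    it.foldl stepYX (a, b) = ((it.foldl stepXY (b, a)).2, (it.foldl stepXY (b, a)).1) := by
  induction it with
  | nil => intro a b; rfl
  | cons i t ih =>
    intro a b
    rw [List.foldl_cons, List.foldl_cons]
    have : stepYX (a, b) i = ((stepXY (b, a) i).2, (stepXY (b, a) i).1) := by
      unfold stepYX stepXY; dsimp only; split <;> rfl
    rw [this, ih]

-- characterisation of B's accumulation loop
theorem lemB (l : List Char) (cntL cntS : PySem.Dict Char Int) :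
    ∀ (seen : PySem.Dict Char Int) (acc : List Char),
    (l.foldl (bStep cntL cntS) (seen, acc)).2
      = acc ++ dropBy (l.filter (fun c => PySem.Chars.isdigit c))
          (fun c => (min (cntL.getD c 0) (cntS.getD c 0) - seen.getD c 0).toNat) := by
  induction l with
  | nil => intro seen acc; simp [dropBy]
  | cons c t ih =>
    intro seen acc
    rw [List.foldl_cons]
    by_cases hd : PySem.Chars.isdigit c
    · have hstep : bStep cntL cntS (seen, acc) c =
        (seen.insert c (seen.getD c 0 + 1),
          if seen.getD c 0 + 1 > min (cntL.getD c 0) (cntS.getD c 0) then acc ++ [c] else acc) := by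
        unfold bStep; rw [if_pos hd]; dsimp only; split <;> rfl
      rw [hstep]
      set m := min (cntL.getD c 0) (cntS.getD c 0) with hm
      by_cases hgt : seen.getD c 0 + 1 > m
      · rw [if_pos hgt, ih]
        rw [List.filter_cons, if_pos hd, dropBy, if_neg (by simp; omega)]
        simp only [List.append_assoc, List.singleton_append]
        refine congrArg (acc ++ c :: ·) (dropBy_congr fun c' _ => ?_)
        by_cases e : c' = c
        · subst e; rw [PySem.Dict.getD_insert_self]; omega
        · rw [PySem.Dict.getD_insert_of_ne _ _ _ e]
      · rw [if_neg hgt, ih]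
        rw [List.filter_cons, if_pos hd, dropBy, if_pos (by simp; omega)]
        refine congrArg (acc ++ ·) (dropBy_congr fun c' _ => ?_)
        by_cases e : c' = c
        · subst e; rw [PySem.Dict.getD_insert_self]; simp; omega
        · rw [PySem.Dict.getD_insert_of_ne _ _ _ e]
          simp [e]
    · have hstep : bStep cntL cntS (seen, acc) c = (seen, acc) := by
        unfold bStep; rw [if_neg hd]
      rw [hstep, ih, List.filter_cons, if_neg hd]

theorem counterOf_getD (s : List Char) (c : Char) :
    (counterOf s).getD c 0 = (s.count c : Int) := by
  unfold counterOf
  rw [PySem.Dict.getD_foldl_insert_add_one]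
  simp

theorem counterOf_contains (s : List Char) (c : Char) :
    (counterOf s).contains c = s.contains c := by
  unfold counterOf
  rw [PySem.Dict.foldl_insert_getD_add_one_eq_counter, PySem.Dict.contains_counter]

-- the two digit lists agree, per pairing (longer, shorter)
theorem digits_eq_long (L S : List Char) :
    ((S.foldl stepXY (L, S)).1).filter (fun c => PySem.Chars.isdigit c)
      = (L.foldl (bStep (counterOf L) (counterOf S)) (PySem.Dict.empty, [])).2 := by
  rw [lemB, lemX]
  simp only [List.nil_append]
  refine dropBy_congr fun c _ => ?_
  rw [counterOf_getD, counterOf_getD, PySem.Dict.getD_empty]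
  omega

theorem digits_eq_short (L S : List Char) :
    ((S.foldl stepXY (L, S)).2).filter (fun c => PySem.Chars.isdigit c)
      = S.filter (fun c => PySem.Chars.isdigit c && !((counterOf L).contains c)) := by
  rw [lemY]
  refine List.filter_congr fun c hc => ?_
  rw [counterOf_contains]
  simp [hc]

-- the common tail: A's empty-string if-chain equals B's two per-side conditionals
theorem tail_eq (xd yd : List Char) :
    [digitsToInt (if xd = [] ∧ yd = [] then (['1'], ['1'])
        else if xd = [] ∧ yd ≠ [] then (['1'], yd)
        else if xd ≠ [] ∧ yd = [] then (xd, ['1'])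
        else (xd, yd) : List Char × List Char).1,
     digitsToInt (if xd = [] ∧ yd = [] then (['1'], ['1'])
        else if xd = [] ∧ yd ≠ [] then (['1'], yd)
        else if xd ≠ [] ∧ yd = [] then (xd, ['1'])
        else (xd, yd) : List Char × List Char).2]
      = [if xd ≠ [] then digitsToInt xd else 1, if yd ≠ [] then digitsToInt yd else 1] := by
  have h1 : digitsToInt ['1'] = 1 := by decide
  by_cases hx : xd = [] <;> by_cases hy : yd = [] <;> simp [hx, hy, h1]

-- ===== VERDICT (by name: the statement is the Claim_ definition above) =====
theorem check_spec : Claim_equal_check := by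
  intro x y _
  show check x y = check_alt x y
  simp only [check, check_alt]
  set xs := x.toList with hxs
  set ys := y.toList with hys
  rcases Nat.lt_trichotomy xs.length ys.length with hlt | heq | hgt
  · -- x shorter: A branch 2; B picks longer = ys, swapped = true
    rw [if_neg (show ¬ xs.length > ys.length by omega), if_pos hlt,
      if_neg (show ¬ xs.length ≥ ys.length by omega),
      if_pos (show ((ys, xs, true) : List Char × List Char × Bool).2.2 = true from rfl)]
    dsimp only
    rw [lemSwap]
    dsimp only
    rw [digits_eq_short ys xs, digits_eq_long ys xs]
    exact tail_eq _ _
  · -- equal lengths: A branch 3 = branch 1; B picks longer = xs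
    rw [if_neg (show ¬ xs.length > ys.length by omega),
      if_neg (show ¬ xs.length < ys.length by omega),
      if_pos (show xs.length ≥ ys.length by omega),
      if_neg (show ¬ ((xs, ys, false) : List Char × List Char × Bool).2.2 = true from by simp)]
    dsimp only
    rw [digits_eq_long xs ys, digits_eq_short xs ys]
    exact tail_eq _ _
  · -- x longer: A branch 1; B picks longer = xs
    rw [if_pos hgt, if_pos (show xs.length ≥ ys.length by omega),
      if_neg (show ¬ ((xs, ys, false) : List Char × List Char × Bool).2.2 = true from by simp)]
    dsimp only
    rw [digits_eq_long xs ys, digits_eq_short xs ys]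
    exact tail_eq _ _
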